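-- pv_equiv track=rewrite | github.com/hyundang/coding_test | math/11576.py | convertB
-- ===== SOURCE A (Python) =====
-- def convertB(a, b):
--     res = []
--     res.append(a%b)
--     a = a//b
--     while(a != 0):
--         res.append(a%b)
--         a = a//b
--     res.reverse()
--     return res
-- ===== SOURCE B (Python) =====
-- def convertB(a, b):
--     r = a % b
--     q = a // b
--     if q == 0:
--         return [r]
--     return convertB(q, b) + [r]
-- ===== Notes on version B (the rewrite author's own statement) =====
-- stated objective: simpler
-- what changed: Replaces the do-while loop with accumulator list and final reverse() by direct recursion on a//b that builds the most-significant-first digit list as the recursion unwinds, with no explicit reverse and no primed first iteration.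
import Mathlib
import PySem

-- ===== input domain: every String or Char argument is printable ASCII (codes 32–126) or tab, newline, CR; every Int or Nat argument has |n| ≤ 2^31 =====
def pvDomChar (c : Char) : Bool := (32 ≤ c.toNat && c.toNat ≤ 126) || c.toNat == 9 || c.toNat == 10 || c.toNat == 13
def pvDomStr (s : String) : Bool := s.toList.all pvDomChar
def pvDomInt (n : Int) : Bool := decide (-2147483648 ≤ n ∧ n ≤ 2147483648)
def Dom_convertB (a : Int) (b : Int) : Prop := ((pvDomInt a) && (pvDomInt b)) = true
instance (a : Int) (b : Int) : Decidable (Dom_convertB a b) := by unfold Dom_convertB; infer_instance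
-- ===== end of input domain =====

-- B replaces A's append-then-reverse while loop by direct recursion on a//b (no reverse, no primed
-- first iteration); objective: simpler.  Equivalence is over the return value on all inputs where
-- the Python A terminates (Pre_ below).

-- ===== PORT A =====
-- A's while loop; the fuel only bounds the recursion (Python's loop diverges outside Pre_),
-- inside Pre_ the loop always stops on a = 0 long before the fuel runs out (aLoop_fuel_irrel).
def aLoop (fuel : Nat) (a b : Int) (res : List Int) : List Int :=
  match fuel with
  | 0 => res
  | n + 1 =>
    if a ≠ 0 then aLoop n (PySem.Int.floordiv a b) b (res ++ [PySem.Int.mod a b]) else res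

def convertB (a : Int) (b : Int) : List Int :=
  (aLoop (2 * a.natAbs + 2) (PySem.Int.floordiv a b) b [PySem.Int.mod a b]).reverse

-- ===== PORT B =====
-- B's recursion on a//b; same fuel remark as above.
def altGo (fuel : Nat) (a b : Int) : List Int :=
  match fuel with
  | 0 => []
  | n + 1 =>
    let r := PySem.Int.mod a b
    let q := PySem.Int.floordiv a b
    if q = 0 then [r] else altGo n q b ++ [r]

def convertB_alt (a : Int) (b : Int) : List Int := altGo (2 * a.natAbs + 2) a b

-- ===== PRECONDITION & SPEC =====
-- Pre_ is exactly the set of inputs on which the Python A terminates: b = 0 raises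
-- ZeroDivisionError; b ∈ {-1, 1} with a ≠ 0, and b ≥ 1 with a < 0, make the while loop spin forever.
def Pre_convertB (a : Int) (b : Int) : Prop :=
  (0 ≤ a ∧ 2 ≤ b) ∨ b ≤ -2 ∨ (a = 0 ∧ ¬ b = 0)
instance (a : Int) (b : Int) : Decidable (Pre_convertB a b) := by unfold Pre_convertB; infer_instance
def pvWitness_convertB : Int × Int := (11576, 2)

def Spec_convertB (a : Int) (b : Int) (out : List Int) : Prop := out = convertB_alt a b
instance (a : Int) (b : Int) (out : List Int) : Decidable (Spec_convertB a b out) := by unfold Spec_convertB; infer_instance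

-- ===== CLAIM (what is proved, stated in full; the proofs are below) =====
def Claim_equal_convertB : Prop := ∀ (a : Int) (b : Int), Dom_convertB a b → Pre_convertB a b → Spec_convertB a b (convertB a b)

-- ===== LEMMAS AND PROOFS =====

-- loop invariant measure: strictly decreases across one division step inside Pre_
def pvMeas (a : Int) : Nat := 2 * a.natAbs + (if 0 < a then 1 else 0)

-- the base-shape part of Pre_ that is preserved by the division step
def pvInv (a b : Int) : Prop := (0 ≤ a ∧ 2 ≤ b) ∨ b ≤ -2

theorem pvInv_step (a b : Int) (h : pvInv a b) : pvInv (PySem.Int.floordiv a b) b := by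
  rcases h with ⟨ha, hb⟩ | hb
  · left
    refine ⟨?_, hb⟩
    have := PySem.Int.floordiv_mul_add_mod a b
    have h1 := PySem.Int.mod_nonneg a (b := b) (by omega)
    have h2 := PySem.Int.mod_lt a (b := b) (by omega)
    nlinarith [PySem.Int.floordiv_mul_add_mod a b]
  · right; exact hb

theorem pvMeas_step (a b : Int) (h : pvInv a b) (hq : PySem.Int.floordiv a b ≠ 0) :
    pvMeas (PySem.Int.floordiv a b) < pvMeas a := by
  set q := PySem.Int.floordiv a b with hqdef
  have heq := PySem.Int.floordiv_mul_add_mod a b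
  rw [← hqdef] at heq
  unfold pvMeas
  rcases h with ⟨ha, hb⟩ | hb
  · -- positive base: 0 ≤ q and b*q ≤ a with b ≥ 2 gives q < a
    have h1 := PySem.Int.mod_nonneg a (b := b) (by omega)
    have h2 := PySem.Int.mod_lt a (b := b) (by omega)
    have hq0 : 0 ≤ q := by nlinarith
    have hq1 : 1 ≤ q := by omega
    have hqa : q < a := by nlinarith
    have h0a : 0 < a := by omega
    rw [if_pos (by omega : (0:Int) < q), if_pos h0a]
    omega
  · -- negative base: b < mod ≤ 0
    have hmb := PySem.Int.mod_neg_bounds a (b := b) (by omega)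
    rcases lt_trichotomy q 0 with hqn | hq0 | hqp
    · -- q < 0 : a = q*b + r ≥ 2|q| - |b| + 1 … ≥ 2|q| - 1 > 0
      have hbq : 2 * (-q) ≤ q * b := by nlinarith
      have ha1 : 2 * (-q) - 1 ≤ a := by nlinarith
      have h0a : 0 < a := by omega
      rw [if_neg (by omega : ¬ (0:Int) < q), if_pos h0a]
      omega
    · exact absurd hq0 hq
    · -- q > 0 : a ≤ q*b ≤ -2q < 0
      have hbq : q * b ≤ -(2 * q) := by nlinarith
      have ha1 : a ≤ -(2 * q) := by nlinarith
      have h0a : ¬ 0 < a := by omega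
      rw [if_pos hqp, if_neg h0a]
      omega

theorem aLoop_acc (f : Nat) (a b : Int) (res : List Int) :
    aLoop f a b res = res ++ aLoop f a b [] := by
  induction f generalizing a res with
  | zero => simp [aLoop]
  | succ n ih =>
    by_cases h : a = 0
    · simp [aLoop, h]
    · rw [aLoop, if_pos h]
      conv_rhs => rw [aLoop, if_pos h]
      rw [ih, ih (PySem.Int.floordiv a b) ([] ++ [PySem.Int.mod a b])]
      simp

theorem altGo_eq_aLoop (f : Nat) (a b : Int) (hinv : pvInv a b) (hf : pvMeas a < f) :
    altGo f a b = (aLoop f (PySem.Int.floordiv a b) b []).reverse ++ [PySem.Int.mod a b] := by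
  induction f generalizing a with
  | zero => omega
  | succ n ih =>
    by_cases hq : PySem.Int.floordiv a b = 0
    · simp [altGo, aLoop, hq]
    · rw [altGo]
      simp only [if_neg hq]
      rw [ih (PySem.Int.floordiv a b) (pvInv_step a b hinv)
            (by have := pvMeas_step a b hinv hq; omega)]
      conv_rhs => rw [aLoop, if_pos hq, aLoop_acc]
      simp

theorem convertB_eq (a b : Int) (h : Pre_convertB a b) : convertB a b = convertB_alt a b := by
  rcases h with h | h | ⟨h0, _⟩
  · -- pvInv holds (positive base)
    rw [convertB, convertB_alt, aLoop_acc,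
        altGo_eq_aLoop _ a b (Or.inl h) (by unfold pvMeas; split_ifs <;> omega)]
    simp
  · -- pvInv holds (negative base)
    rw [convertB, convertB_alt, aLoop_acc,
        altGo_eq_aLoop _ a b (Or.inr h) (by unfold pvMeas; split_ifs <;> omega)]
    simp
  · -- a = 0, b ≠ 0 : both return [0 % b] immediately
    subst h0
    have hq : PySem.Int.floordiv 0 b = 0 := by
      simp [PySem.Int.floordiv, Int.fdiv]
    rw [convertB, convertB_alt]
    simp [aLoop, altGo, hq]

-- ===== VERDICT (by name: the statement is the Claim_ definition above) =====
theorem convertB_spec : Claim_equal_convertB := by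
  intro a b _ hpre
  exact convertB_eq a b hpre
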